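-- pv_equiv track=rewrite | github.com/MichielCreemers/ChessVision | board/pieces.py | map_points_to_grid
-- ===== SOURCE A (Python) =====
-- grid_coords = {
--     'A8': [(0, 0), (80, 80)], 'B8': [(80, 0), (160, 80)], 'C8': [(160, 0), (240, 80)], 'D8': [(240, 0), (320, 80)],
--     'E8': [(320, 0), (400, 80)], 'F8': [(400, 0), (480, 80)], 'G8': [(480, 0), (560, 80)], 'H8': [(560, 0), (640, 80)],
--     'A7': [(0, 80), (80, 160)], 'B7': [(80, 80), (160, 160)], 'C7': [(160, 80), (240, 160)], 'D7': [(240, 80), (320, 160)],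
--     'E7': [(320, 80), (400, 160)], 'F7': [(400, 80), (480, 160)], 'G7': [(480, 80), (560, 160)], 'H7': [(560, 80), (640, 160)],
--     'A6': [(0, 160), (80, 240)], 'B6': [(80, 160), (160, 240)], 'C6': [(160, 160), (240, 240)], 'D6': [(240, 160), (320, 240)],
--     'E6': [(320, 160), (400, 240)], 'F6': [(400, 160), (480, 240)], 'G6': [(480, 160), (560, 240)], 'H6': [(560, 160), (640, 240)],
--     'A5': [(0, 240), (80, 320)], 'B5': [(80, 240), (160, 320)], 'C5': [(160, 240), (240, 320)], 'D5': [(240, 240), (320, 320)],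
--     'E5': [(320, 240), (400, 320)], 'F5': [(400, 240), (480, 320)], 'G5': [(480, 240), (560, 320)], 'H5': [(560, 240), (640, 320)],
--     'A4': [(0, 320), (80, 400)], 'B4': [(80, 320), (160, 400)], 'C4': [(160, 320), (240, 400)], 'D4': [(240, 320), (320, 400)],
--     'E4': [(320, 320), (400, 400)], 'F4': [(400, 320), (480, 400)], 'G4': [(480, 320), (560, 400)], 'H4': [(560, 320), (640, 400)],
--     'A3': [(0, 400), (80, 480)], 'B3': [(80, 400), (160, 480)], 'C3': [(160, 400), (240, 480)], 'D3': [(240, 400), (320, 480)],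
--     'E3': [(320, 400), (400, 480)], 'F3': [(400, 400), (480, 480)], 'G3': [(480, 400), (560, 480)], 'H3': [(560, 400), (640, 480)],
--     'A2': [(0, 480), (80, 560)], 'B2': [(80, 480), (160, 560)], 'C2': [(160, 480), (240, 560)], 'D2': [(240, 480), (320, 560)],
--     'E2': [(320, 480), (400, 560)], 'F2': [(400, 480), (480, 560)], 'G2': [(480, 480), (560, 560)], 'H2': [(560, 480), (640, 560)],
--     'A1': [(0, 560), (80, 640)], 'B1': [(80, 560), (160, 640)], 'C1': [(160, 560), (240, 640)], 'D1': [(240, 560), (320, 640)],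
--     'E1': [(320, 560), (400, 640)], 'F1': [(400, 560), (480, 640)], 'G1': [(480, 560), (560, 640)], 'H1': [(560, 560), (640, 640)]
-- }
--
-- def map_points_to_grid(points, grid=grid_coords):
--     square_counts = {square: 0 for square in grid.keys()}
--
--     for point in points:
--         x, y = point
--         for square, ((x1, y1), (x2, y2)) in grid.items():
--             if x1 <= x <= x2 and y1 <= y <= y2:
--                 square_counts[square] += 1
--                 break
--
--     # Find square with most points
--     max_square = max(square_counts, key=square_counts.get)
--     return max_square if square_counts[max_square] > 0 else None
-- ===== SOURCE B (Python) =====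
-- grid_coords = {
--     'A8': [(0, 0), (80, 80)], 'B8': [(80, 0), (160, 80)], 'C8': [(160, 0), (240, 80)], 'D8': [(240, 0), (320, 80)],
--     'E8': [(320, 0), (400, 80)], 'F8': [(400, 0), (480, 80)], 'G8': [(480, 0), (560, 80)], 'H8': [(560, 0), (640, 80)],
--     'A7': [(0, 80), (80, 160)], 'B7': [(80, 80), (160, 160)], 'C7': [(160, 80), (240, 160)], 'D7': [(240, 80), (320, 160)],
--     'E7': [(320, 80), (400, 160)], 'F7': [(400, 80), (480, 160)], 'G7': [(480, 80), (560, 160)], 'H7': [(560, 80), (640, 160)],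
--     'A6': [(0, 160), (80, 240)], 'B6': [(80, 160), (160, 240)], 'C6': [(160, 160), (240, 240)], 'D6': [(240, 160), (320, 240)],
--     'E6': [(320, 160), (400, 240)], 'F6': [(400, 160), (480, 240)], 'G6': [(480, 160), (560, 240)], 'H6': [(560, 160), (640, 240)],
--     'A5': [(0, 240), (80, 320)], 'B5': [(80, 240), (160, 320)], 'C5': [(160, 240), (240, 320)], 'D5': [(240, 240), (320, 320)],
--     'E5': [(320, 240), (400, 320)], 'F5': [(400, 240), (480, 320)], 'G5': [(480, 240), (560, 320)], 'H5': [(560, 240), (640, 320)],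
--     'A4': [(0, 320), (80, 400)], 'B4': [(80, 320), (160, 400)], 'C4': [(160, 320), (240, 400)], 'D4': [(240, 320), (320, 400)],
--     'E4': [(320, 320), (400, 400)], 'F4': [(400, 320), (480, 400)], 'G4': [(480, 320), (560, 400)], 'H4': [(560, 320), (640, 400)],
--     'A3': [(0, 400), (80, 480)], 'B3': [(80, 400), (160, 480)], 'C3': [(160, 400), (240, 480)], 'D3': [(240, 400), (320, 480)],
--     'E3': [(320, 400), (400, 480)], 'F3': [(400, 400), (480, 480)], 'G3': [(480, 400), (560, 480)], 'H3': [(560, 400), (640, 480)],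
--     'A2': [(0, 480), (80, 560)], 'B2': [(80, 480), (160, 560)], 'C2': [(160, 480), (240, 560)], 'D2': [(240, 480), (320, 560)],
--     'E2': [(320, 480), (400, 560)], 'F2': [(400, 480), (480, 560)], 'G2': [(480, 480), (560, 560)], 'H2': [(560, 480), (640, 560)],
--     'A1': [(0, 560), (80, 640)], 'B1': [(80, 560), (160, 640)], 'C1': [(160, 560), (240, 640)], 'D1': [(240, 560), (320, 640)],
--     'E1': [(320, 560), (400, 640)], 'F1': [(400, 560), (480, 640)], 'G1': [(480, 560), (560, 640)], 'H1': [(560, 560), (640, 640)]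
-- }
--
--
-- def map_points_to_grid(points, grid=grid_coords):
--     # Loop inversion: sweep the grid squares once; each square captures (peels off)
--     # the still-unassigned points lying in its rectangle, which reproduces the
--     # first-containing-square assignment, and a running strict max picks the winner.
--     best, best_n = None, 0
--     remaining = list(points)
--     for square, ((x1, y1), (x2, y2)) in grid.items():
--         n = sum(1 for (x, y) in remaining if x1 <= x <= x2 and y1 <= y <= y2)
--         if n > best_n:
--             best, best_n = square, n
--         remaining = [(x, y) for (x, y) in remaining if not (x1 <= x <= x2 and y1 <= y <= y2)]
--     return best
-- ===== Notes on version B (the rewrite author's own statement) =====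
-- stated objective: alternative
-- what changed: B inverts the loop nesting: instead of A's per-point scan over grid squares with a dense zero-initialized counter dict followed by max(key=dict.get) and a >0 sentinel check, B sweeps the grid squares once, peeling the still-unassigned points captured by each square from a shrinking list and keeping a running (best, count) strict maximum.
-- outside the precondition, e.g. on map_points_to_grid([], {'A1': [(0, 0)]}): A returns None, B raises ValueError
import Mathlib
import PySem

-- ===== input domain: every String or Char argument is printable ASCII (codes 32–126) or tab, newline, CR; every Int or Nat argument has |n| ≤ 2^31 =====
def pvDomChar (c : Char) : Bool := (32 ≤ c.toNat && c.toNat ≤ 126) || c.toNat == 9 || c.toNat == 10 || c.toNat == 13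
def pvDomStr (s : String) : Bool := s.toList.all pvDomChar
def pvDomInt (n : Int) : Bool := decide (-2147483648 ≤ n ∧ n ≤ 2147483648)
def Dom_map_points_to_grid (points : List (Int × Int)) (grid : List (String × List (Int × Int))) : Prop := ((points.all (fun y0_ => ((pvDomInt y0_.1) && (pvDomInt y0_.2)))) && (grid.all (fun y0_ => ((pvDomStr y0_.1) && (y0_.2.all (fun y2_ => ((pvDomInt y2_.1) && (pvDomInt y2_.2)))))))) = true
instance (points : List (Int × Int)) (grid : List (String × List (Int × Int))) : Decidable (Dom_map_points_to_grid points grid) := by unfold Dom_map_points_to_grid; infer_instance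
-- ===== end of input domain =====

-- B inverts the loop nesting: one sweep over the grid squares, each square peeling the
-- still-unassigned points it captures from a shrinking list, with a running strict maximum,
-- instead of A's per-point scan + dense counter dict + max(key) + >0 sentinel (objective: alternative).

-- ===== PORT A =====
-- A's inner `for square, ((x1, y1), (x2, y2)) in grid.items(): … break` loop for one point
def pvAInner (x y : Int) (d : PySem.Dict String Int) :
    List (String × List (Int × Int)) → PySem.Dict String Int
  | [] => d
  | (square, rect) :: rest =>
    match rect with
    | [(x1, y1), (x2, y2)] =>
        if x1 ≤ x ∧ x ≤ x2 ∧ y1 ≤ y ∧ y ≤ y2 then d.modify square 0 (· + 1)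
        else pvAInner x y d rest
    | _ => d  -- Python raises ValueError unpacking this value; Pre_ keeps such scans unreachable

def map_points_to_grid (points : List (Int × Int)) (grid : List (String × List (Int × Int))) :
    Option String :=
  let init : PySem.Dict String Int := grid.foldl (fun d kv => d.insert kv.1 0) PySem.Dict.empty
  let sc := points.foldl (fun d p => pvAInner p.1 p.2 d grid) init
  match PySem.List.max? sc.keys (fun sq => sc.getD sq 0) with
  | none => none        -- Python: max() of an empty dict raises ValueError; Pre_ excludes grid = []
  | some m => if sc.getD m 0 > 0 then some m else none

-- ===== PORT B =====
-- B's grid sweep: state (best, best_n) and the shrinking `remaining` list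
def pvPeel (st : Option String × Int) (remaining : List (Int × Int)) :
    List (String × List (Int × Int)) → Option String
  | [] => st.1
  | (square, rect) :: rest =>
    match rect with
    | [(x1, y1), (x2, y2)] =>
      let n : Int :=
        (remaining.countP (fun p => decide (x1 ≤ p.1 ∧ p.1 ≤ x2 ∧ y1 ≤ p.2 ∧ p.2 ≤ y2)) : Int)
      let st' := if n > st.2 then (some square, n) else st
      pvPeel st'
        (remaining.filter (fun p => !decide (x1 ≤ p.1 ∧ p.1 ≤ x2 ∧ y1 ≤ p.2 ∧ p.2 ≤ y2))) rest
    | _ => st.1  -- Python raises ValueError unpacking this value; Pre_ excludes malformed grids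

def map_points_to_grid_alt (points : List (Int × Int)) (grid : List (String × List (Int × Int))) :
    Option String :=
  pvPeel (none, 0) points grid

-- ===== PRECONDITION & SPEC =====
-- a grid entry whose value Python can unpack as ((x1, y1), (x2, y2)): exactly two corner points
def pvGood (kv : String × List (Int × Int)) : Bool := kv.2.length == 2

-- Pre_ excludes: the empty grid (A's max() raises ValueError; see Raises_ below); association
-- lists with duplicate keys, to which no single Python dict corresponds; and grids with a square
-- value that is not exactly two corner points — B sweeps every square and raises ValueError
-- unpacking such a value, whereas A's per-point scan may never reach it (A returns there only
-- when every point is captured earlier or there are no points).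
def Pre_map_points_to_grid (points : List (Int × Int)) (grid : List (String × List (Int × Int))) : Prop :=
  grid ≠ [] ∧ (grid.map Prod.fst).Nodup ∧ grid.all pvGood = true
instance (points : List (Int × Int)) (grid : List (String × List (Int × Int))) : Decidable (Pre_map_points_to_grid points grid) := by unfold Pre_map_points_to_grid; infer_instance

def pvWitness_map_points_to_grid : (List (Int × Int)) × (List (String × List (Int × Int))) :=
  ([(1, 2)], [("A1", [(0, 0), (80, 80)])])

def Spec_map_points_to_grid (points : List (Int × Int)) (grid : List (String × List (Int × Int))) (out : Option String) : Prop := out = map_points_to_grid_alt points grid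
instance (points : List (Int × Int)) (grid : List (String × List (Int × Int))) (out : Option String) : Decidable (Spec_map_points_to_grid points grid out) := by unfold Spec_map_points_to_grid; infer_instance

-- ===== CLAIM (what is proved, stated in full; the proofs are below) =====
def Claim_equal_map_points_to_grid : Prop := ∀ (points : List (Int × Int)) (grid : List (String × List (Int × Int))), Dom_map_points_to_grid points grid → Pre_map_points_to_grid points grid → Spec_map_points_to_grid points grid (map_points_to_grid points grid)

-- ===== LEMMAS AND PROOFS =====

-- B's containment test for one point against one (well-formed) grid entry
def pvHit (p : Int × Int) (kv : String × List (Int × Int)) : Bool :=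
  match kv.2 with
  | [(x1, y1), (x2, y2)] => decide (x1 ≤ p.1 ∧ p.1 ≤ x2 ∧ y1 ≤ p.2 ∧ p.2 ≤ y2)
  | _ => false

-- the first grid square whose rectangle contains the point (A's inner scan, value only)
def pvFirstHit (grid : List (String × List (Int × Int))) (point : Int × Int) : Option String :=
  match grid with
  | [] => none
  | (square, rect) :: rest =>
    match rect with
    | [(x1, y1), (x2, y2)] =>
        if x1 ≤ point.1 ∧ point.1 ≤ x2 ∧ y1 ≤ point.2 ∧ point.2 ≤ y2 then some square
        else pvFirstHit rest point
    | _ => none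

-- A's inner break-loop is: bump the first-hit square (if any) with d[sq] += 1
theorem pvAInner_eq_firstHit (g : List (String × List (Int × Int))) (x y : Int)
    (d : PySem.Dict String Int) (hg : g.all pvGood = true) :
    pvAInner x y d g = match pvFirstHit g (x, y) with
      | some h => d.modify h 0 (· + 1)
      | none => d := by
  induction g with
  | nil => rfl
  | cons kv rest ih =>
    obtain ⟨square, rect⟩ := kv
    simp only [List.all_cons, Bool.and_eq_true] at hg
    match rect with
    | [] => simp [pvGood] at hg
    | [_] => simp [pvGood] at hg
    | (x1, y1) :: (x2, y2) :: [] =>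
      simp only [pvAInner, pvFirstHit]
      split_ifs <;> simp [ih hg.2]
    | _ :: _ :: _ :: _ => simp [pvGood] at hg

-- a first hit is a grid key
theorem pvFirstHit_mem (g : List (String × List (Int × Int))) (p : Int × Int) (h : String)
    (hh : pvFirstHit g p = some h) : h ∈ g.map Prod.fst := by
  induction g with
  | nil => simp [pvFirstHit] at hh
  | cons kv rest ih =>
    obtain ⟨square, rect⟩ := kv
    match rect with
    | [] => simp [pvFirstHit] at hh
    | [_] => simp [pvFirstHit] at hh
    | (x1, y1) :: (x2, y2) :: [] =>
      simp only [pvFirstHit] at hh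
      split_ifs at hh with hc
      · simp at hh; simp [hh]
      · simpa using Or.inr (ih hh)
    | _ :: _ :: _ :: _ => simp [pvFirstHit] at hh

-- for a well-formed head entry, the first hit factors through pvHit
theorem pvFirstHit_cons (kv : String × List (Int × Int)) (rest : List (String × List (Int × Int)))
    (p : Int × Int) (hg : pvGood kv = true) :
    pvFirstHit (kv :: rest) p = if pvHit p kv then some kv.1 else pvFirstHit rest p := by
  obtain ⟨square, rect⟩ := kv
  match rect with
  | [] => simp [pvGood] at hg
  | [_] => simp [pvGood] at hg
  | (x1, y1) :: (x2, y2) :: [] =>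
    simp [pvFirstHit, pvHit]
  | _ :: _ :: _ :: _ => simp [pvGood] at hg

-- A's zero-initialization: every count starts at 0
theorem pvInit_getD (g : List (String × List (Int × Int))) (d : PySem.Dict String Int)
    (hd : ∀ k, d.getD k 0 = 0) (k : String) :
    (g.foldl (fun d kv => d.insert kv.1 (0 : Int)) d).getD k 0 = 0 := by
  induction g generalizing d with
  | nil => exact hd k
  | cons kv rest ih =>
    refine ih _ (fun k' => ?_)
    rw [PySem.Dict.getD_insert]
    split <;> simp [hd]

-- A's counting loop computes, at every key, the number of points whose first hit is that key
theorem pvACount (grid : List (String × List (Int × Int))) (hg : grid.all pvGood = true)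
    (points : List (Int × Int)) (d : PySem.Dict String Int) (k : String) :
    (points.foldl (fun d p => pvAInner p.1 p.2 d grid) d).getD k 0
      = d.getD k 0 + ((points.filterMap (pvFirstHit grid)).count k : Int) := by
  induction points generalizing d with
  | nil => simp
  | cons p rest ih =>
    simp only [List.foldl_cons, List.filterMap_cons]
    rw [ih, pvAInner_eq_firstHit grid p.1 p.2 d hg]
    cases hfh : pvFirstHit grid (p.1, p.2) with
    | none => simp
    | some h =>
      rw [PySem.Dict.getD_modify]
      by_cases hk : k = h
      · subst hk
        simp [List.count_cons]
        omega
      · simp [List.count_cons, hk]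
        exact Ne.symm hk

-- A's counting loop does not change the key list when every first hit is already a key
theorem pvAKeys (grid : List (String × List (Int × Int))) (hg : grid.all pvGood = true)
    (points : List (Int × Int))
    (d : PySem.Dict String Int) (hd : d.keys = grid.map Prod.fst) :
    (points.foldl (fun d p => pvAInner p.1 p.2 d grid) d).keys = grid.map Prod.fst := by
  induction points generalizing d with
  | nil => exact hd
  | cons p rest ih =>
    simp only [List.foldl_cons]
    refine ih _ ?_
    rw [pvAInner_eq_firstHit grid p.1 p.2 d hg]
    cases hfh : pvFirstHit grid (p.1, p.2) with
    | none => exact hd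
    | some h =>
      have hmem : h ∈ d.keys := hd ▸ pvFirstHit_mem grid (p.1, p.2) h hfh
      rw [PySem.Dict.keys_modify, PySem.Dict.keys_insert_of_contains, hd]
      exact (PySem.Dict.contains_iff_mem_keys _ _).2 hmem

-- keys of A's zero-initialized dict = the (nodup) grid keys
theorem pvInit_keys (grid : List (String × List (Int × Int)))
    (hnd : (grid.map Prod.fst).Nodup) :
    (grid.foldl (fun d kv => d.insert kv.1 (0 : Int)) PySem.Dict.empty).keys
      = grid.map Prod.fst := by
  rw [PySem.Dict.keys_foldl_insert_key grid Prod.fst (fun _ _ => (0 : Int)) PySem.Dict.empty,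
    PySem.Dict.keys_empty]
  exact PySem.Set.ofList_eq_self_of_nodup _ hnd

-- the head square's captured count is its first-hit count (head key not repeated later)
theorem pvCount_head (kv : String × List (Int × Int)) (rest : List (String × List (Int × Int)))
    (rem : List (Int × Int)) (hg : pvGood kv = true) (hni : kv.1 ∉ rest.map Prod.fst) :
    (rem.filterMap (pvFirstHit (kv :: rest))).count kv.1 = rem.countP (fun p => pvHit p kv) := by
  induction rem with
  | nil => rfl
  | cons p rem ih =>
    simp only [List.filterMap_cons, List.countP_cons]
    rw [pvFirstHit_cons kv rest p hg]
    by_cases hp : pvHit p kv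
    · simp [hp, List.count_cons, ih]
    · simp only [hp, if_neg, Bool.false_eq_true, not_false_eq_true, ite_false]
      cases hfh : pvFirstHit rest p with
      | none => simp [ih]
      | some h =>
        have : h ≠ kv.1 := by
          intro he; exact hni (he ▸ pvFirstHit_mem rest p h hfh)
        simp [List.count_cons, this, ih]

-- counts at other keys survive peeling off the head square's points
theorem pvCount_tail (kv : String × List (Int × Int)) (rest : List (String × List (Int × Int)))
    (rem : List (Int × Int)) (hg : pvGood kv = true) (k : String) (hk : k ≠ kv.1) :
    (rem.filterMap (pvFirstHit (kv :: rest))).count k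
      = ((rem.filter (fun p => !pvHit p kv)).filterMap (pvFirstHit rest)).count k := by
  induction rem with
  | nil => rfl
  | cons p rem ih =>
    simp only [List.filterMap_cons, List.filter_cons]
    rw [pvFirstHit_cons kv rest p hg]
    by_cases hp : pvHit p kv
    · have hk' : kv.1 ≠ k := Ne.symm hk
      simp [hp, List.count_cons, hk', ih]
    · simp only [hp, Bool.false_eq_true, not_false_eq_true, ite_false, Bool.not_false, ite_true,
        List.filterMap_cons]
      cases hfh : pvFirstHit rest p <;> simp [List.count_cons, ih]

-- B's peeling sweep = a fold over the grid with the first-hit counts of the full grid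
theorem pvPeel_eq (g : List (String × List (Int × Int))) (hg : g.all pvGood = true)
    (hnd : (g.map Prod.fst).Nodup) (rem : List (Int × Int)) (st : Option String × Int) :
    pvPeel st rem g
      = (g.foldl (fun (st : Option String × Int) kv =>
            let n : Int := ((rem.filterMap (pvFirstHit g)).count kv.1 : Int)
            if n > st.2 then (some kv.1, n) else st) st).1 := by
  induction g generalizing rem st with
  | nil => rfl
  | cons kv rest ih =>
    simp only [List.all_cons, Bool.and_eq_true] at hg
    simp only [List.map_cons, List.nodup_cons] at hnd
    obtain ⟨square, rect⟩ := kv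
    match rect with
    | [] => simp [pvGood] at hg
    | [_] => simp [pvGood] at hg
    | (x1, y1) :: (x2, y2) :: [] =>
      simp only [pvPeel, List.foldl_cons]
      have hpred : (fun p : Int × Int =>
          decide (x1 ≤ p.1 ∧ p.1 ≤ x2 ∧ y1 ≤ p.2 ∧ p.2 ≤ y2))
            = fun p => pvHit p (square, [(x1, y1), (x2, y2)]) := by
        funext p; rfl
      have hpred2 : (fun p : Int × Int =>
          !decide (x1 ≤ p.1 ∧ p.1 ≤ x2 ∧ y1 ≤ p.2 ∧ p.2 ≤ y2))
            = fun p => !pvHit p (square, [(x1, y1), (x2, y2)]) := by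
        funext p; rfl
      rw [hpred, hpred2, ih hg.2 hnd.2]
      have hhead := pvCount_head (square, [(x1, y1), (x2, y2)]) rest rem hg.1 hnd.1
      have hstep : (if ((rem.countP (fun p => pvHit p (square, [(x1, y1), (x2, y2)]))) : Int) > st.2
            then ((some square : Option String), ((rem.countP (fun p => pvHit p (square, [(x1, y1), (x2, y2)]))) : Int))
            else st)
          = (if ((rem.filterMap (pvFirstHit ((square, [(x1, y1), (x2, y2)]) :: rest))).count square : Int) > st.2
            then (some square, ((rem.filterMap (pvFirstHit ((square, [(x1, y1), (x2, y2)]) :: rest))).count square : Int))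
            else st) := by
        rw [hhead]
      simp only [] at hstep ⊢
      rw [hstep]
      refine congrArg Prod.fst (PySem.List.foldl_congr_mem _ _ _ _ ?_)
      intro acc kv' hkv'
      have hk' : kv'.1 ≠ square := by
        intro he
        apply hnd.1
        rw [← he]
        exact List.mem_map.mpr ⟨kv', hkv', rfl⟩
      rw [← pvCount_tail (square, [(x1, y1), (x2, y2)]) rest rem hg.1 kv'.1 hk']
    | _ :: _ :: _ :: _ => simp [pvGood] at hg

-- proof-only helper: A's final step (first maximum, then the > 0 sentinel check)
def pvFinish (c : String → Int) : Option String → Option String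
  | none => none
  | some m => if c m > 0 then some m else none

-- the selection lemma: B's single strict-max pass computes A's max(key)+sentinel selection
theorem pvSel_aux (c : String → Int) (hc : ∀ k, 0 ≤ c k) (keys : List String) (m : String) :
    (keys.foldl (fun (st : Option String × Int) k => if c k > st.2 then (some k, c k) else st)
        (if c m > 0 then (some m, c m) else (none, 0))).1
      = pvFinish c (PySem.List.max? (m :: keys) c) := by
  induction keys generalizing m with
  | nil => by_cases hm : c m > 0 <;> simp [hm, PySem.List.max?, pvFinish]
  | cons k rest ih =>
    have hB : (if c k > (if c m > 0 then ((some m : Option String), c m) else (none, 0)).2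
          then ((some k : Option String), c k)
          else (if c m > 0 then (some m, c m) else (none, 0)))
        = (if c (if c m < c k then k else m) > 0
            then (some (if c m < c k then k else m), c (if c m < c k then k else m))
            else (none, 0)) := by
      have h1 := hc m
      have h2 := hc k
      split_ifs <;> first | rfl | omega
    have hmax : PySem.List.max? (m :: k :: rest) c
        = PySem.List.max? ((if c m < c k then k else m) :: rest) c := by
      simp only [PySem.List.max?, List.foldl_cons]
      congr 1
      by_cases hk : c m < c k <;> simp [hk]
    rw [List.foldl_cons, hB, ih (if c m < c k then k else m), hmax]

-- ===== VERDICT (by name: the statement is the Claim_ definition above) =====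
theorem map_points_to_grid_spec : Claim_equal_map_points_to_grid := by
  intro points grid _ hpre
  obtain ⟨hne, hnd, hg⟩ := hpre
  unfold Spec_map_points_to_grid map_points_to_grid map_points_to_grid_alt
  -- the common count function: how many points have this square as their first hit
  set c : String → Int := fun k => ((points.filterMap (pvFirstHit grid)).count k : Int) with hc_def
  have hc : ∀ k, 0 ≤ c k := fun k => Int.natCast_nonneg _
  -- A's dict: keys are the grid keys, values are c
  have hinit : ∀ k, ((grid.foldl (fun d kv => d.insert kv.1 (0 : Int)) PySem.Dict.empty).getD k 0) = 0 :=
    pvInit_getD grid PySem.Dict.empty (fun k => PySem.Dict.getD_empty k 0)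
  have hAval : ∀ k, ((points.foldl (fun d p => pvAInner p.1 p.2 d grid)
      (grid.foldl (fun d kv => d.insert kv.1 (0 : Int)) PySem.Dict.empty)).getD k 0) = c k := by
    intro k
    rw [pvACount grid hg, hinit k]
    simp [hc_def]
  have hAkeys : (points.foldl (fun d p => pvAInner p.1 p.2 d grid)
      (grid.foldl (fun d kv => d.insert kv.1 (0 : Int)) PySem.Dict.empty)).keys
      = grid.map Prod.fst := pvAKeys grid hg points _ (pvInit_keys grid hnd)
  -- rewrite A's side to the shared (keys, c) form
  have hmax : PySem.List.max? (points.foldl (fun d p => pvAInner p.1 p.2 d grid)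
        (grid.foldl (fun d kv => d.insert kv.1 (0 : Int)) PySem.Dict.empty)).keys
        (fun sq => (points.foldl (fun d p => pvAInner p.1 p.2 d grid)
          (grid.foldl (fun d kv => d.insert kv.1 (0 : Int)) PySem.Dict.empty)).getD sq 0)
      = PySem.List.max? (grid.map Prod.fst) c := by
    rw [hAkeys]
    congr 1
    funext sq
    exact hAval sq
  -- rewrite B's side (the peeling sweep) to a fold over the grid keys with counts c
  rw [pvPeel_eq grid hg hnd points (none, 0)]
  simp only []
  rw [hmax]
  simp only [hAval]
  rw [← List.foldl_map (f := Prod.fst)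
    (g := fun (st : Option String × Int) k => if c k > st.2 then (some k, c k) else st)]
  rcases hk : grid.map Prod.fst with _ | ⟨k0, krest⟩
  · exact absurd (List.map_eq_nil_iff.1 hk) hne
  · simp only [List.foldl_cons]
    rw [pvSel_aux c hc krest k0]
    cases ho : PySem.List.max? (k0 :: krest) c <;> simp [pvFinish]
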